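-- pv_equiv track=rewrite | github.com/taras-svystun/High-Performance-Python | testing_code/2/line_profiler_code_example.py | random_function
-- ===== SOURCE A (Python) =====
-- def random_function(spread=10 ** 6):
--     counter = 0
--     for i in range(spread):
--         if abs(i) % 2:
--             counter -= i ** 2
--         if not i % 2:
--             counter += 1
--     return counter
-- ===== SOURCE B (Python) =====
-- def random_function(spread=10 ** 6):
--     if spread <= 0:
--         return 0
--     m = spread // 2                      # number of odd i in range(spread)
--     odd_sq_sum = m * (2 * m - 1) * (2 * m + 1) // 3   # 1^2 + 3^2 + ... + (2m-1)^2
--     return (spread - m) - odd_sq_sum     # evens count minus sum of odd squares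
-- ===== Notes on version B (the rewrite author's own statement) =====
-- stated objective: faster
-- what changed: Replaces the O(n) loop with closed-form formulas: the count of even numbers below spread and the sum of the first m odd squares m(2m-1)(2m+1)/3.
import Mathlib
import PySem

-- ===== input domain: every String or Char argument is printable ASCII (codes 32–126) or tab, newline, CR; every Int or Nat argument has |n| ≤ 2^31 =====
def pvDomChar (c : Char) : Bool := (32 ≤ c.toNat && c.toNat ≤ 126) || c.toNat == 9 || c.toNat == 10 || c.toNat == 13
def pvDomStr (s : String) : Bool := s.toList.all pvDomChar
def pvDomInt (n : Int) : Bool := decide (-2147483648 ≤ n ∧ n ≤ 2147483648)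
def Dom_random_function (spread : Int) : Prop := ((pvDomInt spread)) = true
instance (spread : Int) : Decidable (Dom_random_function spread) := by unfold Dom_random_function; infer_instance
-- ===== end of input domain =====

-- B replaces A's O(n) loop by closed-form arithmetic (even count and sum-of-odd-squares formula); objective: faster (asymptotic).

-- ===== PORT A =====
def random_function (spread : Int) : Int :=
  (PySem.List.pyRange 0 spread 1).foldl
    (fun counter i =>
      let counter := if PySem.Int.mod |i| 2 ≠ 0 then counter - i ^ 2 else counter
      if PySem.Int.mod i 2 = 0 then counter + 1 else counter) 0

-- ===== PORT B =====
def random_function_alt (spread : Int) : Int :=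
  if spread ≤ 0 then 0
  else
    let m := PySem.Int.floordiv spread 2
    let odd_sq_sum := PySem.Int.floordiv (m * (2 * m - 1) * (2 * m + 1)) 3
    (spread - m) - odd_sq_sum

-- ===== PRECONDITION & SPEC =====
def Spec_random_function (spread : Int) (out : Int) : Prop := out = random_function_alt spread
instance (spread : Int) (out : Int) : Decidable (Spec_random_function spread out) := by unfold Spec_random_function; infer_instance

-- ===== CLAIM (what is proved, stated in full; the proofs are below) =====
def Claim_equal_random_function : Prop := ∀ (spread : Int), Dom_random_function spread → Spec_random_function spread (random_function spread)

-- ===== LEMMAS AND PROOFS =====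

-- the closed form, with the `spread ≤ 0` guard removed (valid for all 0 ≤ n)
def pvG (n : Int) : Int :=
  (n - n / 2) - ((n / 2) * (2 * (n / 2) - 1) * (2 * (n / 2) + 1)) / 3

lemma alt_eq_pvG (n : Int) (hn : 0 ≤ n) : random_function_alt n = pvG n := by
  unfold random_function_alt pvG
  rcases lt_or_eq_of_le hn with h | h
  · rw [if_neg (by omega)]
    simp only [PySem.Int.floordiv_eq_ediv_of_pos (show (0:Int) < 2 by norm_num),
      PySem.Int.floordiv_eq_ediv_of_pos (show (0:Int) < 3 by norm_num)]
  · subst h; norm_num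

lemma pvG_step (n : Int) :
    pvG (n + 1) = (if n % 2 ≠ 0 then pvG n - n ^ 2 else pvG n + 1) := by
  unfold pvG
  rcases Int.even_or_odd n with ⟨k, hk⟩ | ⟨k, hk⟩
  · have h1 : (n + 1) / 2 = k := by omega
    have h2 : n / 2 = k := by omega
    rw [h1, h2, if_neg (by omega)]
    ring_nf
  · have h1 : (n + 1) / 2 = k + 1 := by omega
    have h2 : n / 2 = k := by omega
    rw [h1, h2, if_pos (by omega)]
    have key : (k + 1) * (2 * (k + 1) - 1) * (2 * (k + 1) + 1)
        = k * (2 * k - 1) * (2 * k + 1) + (2 * k + 1) ^ 2 * 3 := by ring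
    rw [key, Int.add_mul_ediv_right _ _ (by norm_num : (3:Int) ≠ 0)]
    have hsq : n ^ 2 = (2 * k + 1) ^ 2 := by rw [hk]
    rw [hsq]; ring

lemma fold_eq_pvG (n : Nat) :
    random_function (n : Int) = pvG (n : Int) := by
  unfold random_function
  induction n with
  | zero => simp [pvG]
  | succ m ih =>
    have hcast : ((m + 1 : Nat) : Int) = (m : Int) + 1 := by push_cast; ring
    rw [hcast, PySem.List.pyRange_one_succ_right (by positivity), List.foldl_append]
    rw [ih, pvG_step (m : Int)]
    have hm : 0 ≤ (m : Int) := by positivity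
    have habs : |(m : Int)| = (m : Int) := abs_of_nonneg hm
    simp only [List.foldl, habs, PySem.Int.mod_eq_emod_of_pos (by norm_num : (0:Int) < 2)]
    by_cases h : (m : Int) % 2 = 0 <;> simp [h]

-- ===== VERDICT (by name: the statement is the Claim_ definition above) =====
theorem random_function_spec : Claim_equal_random_function := by
  intro spread _
  unfold Spec_random_function
  rcases le_or_gt spread 0 with h | h
  · unfold random_function random_function_alt
    rw [PySem.List.pyRange_one_eq_nil (by omega), if_pos h]
    rfl
  · have hs : spread = ((spread.toNat : Nat) : Int) := by omega
    rw [hs, fold_eq_pvG, alt_eq_pvG _ (by positivity)]
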